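-- pv_equiv track=rewrite | github.com/JiJiHoon/study-algorithm | boj/workbook/widerplanet/6/14426/main.py | solve
-- ===== SOURCE A (Python) =====
-- class Trie:
--     class Node:
--         def __init__(self, char):
--             self.char = char
--             self.child = {}
--             self.is_word = False
--
--     def __init__(self):
--         self.head = self.Node('')
--
--     def add_word(self, word):
--         node = self.head
--
--         for char in word:
--             if char not in node.child:
--                 node.child[char] = self.Node(char)
--             node = node.child[char]
--
--         node.is_word = True
--
--     def is_exist_prefix(self, prefix):
--         node = self.head
--
--         for char in prefix:
--             if char not in node.child:
--                 return False
--             node = node.child[char]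
--
--         return True
--
-- def solve(words, prefixes):
--     count = 0
--
--     trie = Trie()
--
--     for word in words:
--         trie.add_word(word)
--
--     for prefix in prefixes:
--         if trie.is_exist_prefix(prefix):
--             count += 1
--
--     return count
-- ===== SOURCE B (Python) =====
-- def solve(words, prefixes):
--     seen = {''}
--     for word in words:
--         p = ''
--         for ch in word:
--             p += ch
--             seen.add(p)
--     return sum(1 for q in prefixes if q in seen)
-- ===== Notes on version B (the rewrite author's own statement) =====
-- stated objective: simpler
-- what changed: Replaces the hand-written Trie (node objects, char-by-char descent through dicts) with a flat set of all word prefixes (seeded with '') built in one pass, then a membership count over the queries.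
import Mathlib
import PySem

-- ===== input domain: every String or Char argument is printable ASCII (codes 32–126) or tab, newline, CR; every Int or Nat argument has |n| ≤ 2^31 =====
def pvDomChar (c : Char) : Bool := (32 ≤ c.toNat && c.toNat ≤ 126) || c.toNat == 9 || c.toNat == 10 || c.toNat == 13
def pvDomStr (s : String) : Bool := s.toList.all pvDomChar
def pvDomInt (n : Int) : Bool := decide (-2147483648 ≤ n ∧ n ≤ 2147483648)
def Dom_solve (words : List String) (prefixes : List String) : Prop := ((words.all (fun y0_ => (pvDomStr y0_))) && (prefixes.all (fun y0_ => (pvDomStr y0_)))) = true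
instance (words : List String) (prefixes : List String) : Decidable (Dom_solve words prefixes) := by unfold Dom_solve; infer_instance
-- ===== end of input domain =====

-- B replaces A's hand-written Trie with a flat set of all word prefixes (seeded with "")
-- built in one pass, then counts queries by set membership: simpler, same return value.

-- ===== PORT A =====
-- A's Trie: node = (is_word flag, ordered children); children is an explicit
-- assoc-list inductive (mutual pair) since nested 'List (Char × PTrie)' is not allowed.
mutual
inductive PTrie where
  | node : Bool → PChildren → PTrie
inductive PChildren where
  | nil : PChildren
  | cons : Char → PTrie → PChildren → PChildren
end

-- dict lookup node.child[char] (insertion order, first match)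
def findChild : PChildren → Char → Option PTrie
  | .nil, _ => none
  | .cons c' t cs, c => if c' = c then some t else findChild cs c

-- descend/extend along `rest` at key `c`: 'if char not in node.child: child[char] = Node(char)',
-- then continue add_word's loop inside that child (k is the continuation for the rest of the word)
def updateChild (k : PTrie → PTrie) : PChildren → Char → PChildren
  | .nil, c => .cons c (k (.node false .nil)) .nil
  | .cons c' t cs, c => if c' = c then .cons c' (k t) cs else .cons c' t (updateChild k cs c)

-- Trie.add_word's loop over the word's chars, functionally
def addWordGo : List Char → PTrie → PTrie
  | [], .node _ cs => .node true cs
  | c :: rest, .node b cs => .node b (updateChild (addWordGo rest) cs c)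

-- Trie.is_exist_prefix's loop
def isExistGo : PTrie → List Char → Bool
  | _, [] => true
  | .node _ cs, c :: rest =>
    match findChild cs c with
    | none => false
    | some t => isExistGo t rest

def solve (words : List String) (prefixes : List String) : Int :=
  let trie := words.foldl (fun t w => addWordGo w.toList t) (PTrie.node false .nil)
  prefixes.foldl (fun count p => if isExistGo trie p.toList then count + 1 else count) (0 : Int)

-- ===== PORT B =====
def solve_alt (words : List String) (prefixes : List String) : Int :=
  let seen : PySem.Set String := words.foldl
    (fun s w =>
      (w.toList.foldl
        (fun (st : String × PySem.Set String) ch =>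
          let p := st.1.push ch
          (p, PySem.Set.add st.2 p))
        ("", s)).2)
    (PySem.Set.ofList [""])
  ((prefixes.countP (fun q => PySem.Set.contains seen q) : Nat) : Int)

-- ===== PRECONDITION & SPEC =====
def Spec_solve (words : List String) (prefixes : List String) (out : Int) : Prop := out = solve_alt words prefixes
instance (words : List String) (prefixes : List String) (out : Int) : Decidable (Spec_solve words prefixes out) := by unfold Spec_solve; infer_instance

-- ===== CLAIM (what is proved, stated in full; the proofs are below) =====
def Claim_equal_solve : Prop := ∀ (words : List String) (prefixes : List String), Dom_solve words prefixes → Spec_solve words prefixes (solve words prefixes)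

-- ===== LEMMAS AND PROOFS =====

theorem findChild_updateChild (k : PTrie → PTrie) : ∀ (cs : PChildren) (c' c : Char),
    findChild (updateChild k cs c') c =
      if c = c' then some (k ((findChild cs c').getD (.node false .nil))) else findChild cs c
  | .nil, c', c => by
    by_cases h : c = c'
    · subst h; simp [updateChild, findChild]
    · have h' : ¬ c' = c := fun hh => h hh.symm
      simp [updateChild, findChild, h, h']
  | .cons c'' t cs, c', c => by
    have ih := findChild_updateChild k cs c' c
    simp only [updateChild]
    by_cases h1 : c'' = c'
    · subst h1
      by_cases h2 : c'' = c
      · subst h2; simp [findChild]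
      · have h2' : ¬ c = c'' := fun hh => h2 hh.symm
        simp [findChild, h2, h2']
    · simp only [if_neg h1]
      by_cases h2 : c'' = c
      · subst h2
        simp [findChild, h1]
      · simp [findChild, h1, h2, ih]

theorem isExistGo_fresh (b : Bool) (p : List Char) :
    isExistGo (.node b .nil) p = decide (p = []) := by
  cases p <;> simp [isExistGo, findChild]

theorem isExistGo_addWordGo (p : List Char) : ∀ (w : List Char) (t : PTrie),
    isExistGo (addWordGo w t) p = (isExistGo t p || decide (p <+: w)) := by
  induction p with
  | nil => intro w t; cases t; cases w <;> simp [isExistGo]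
  | cons c ps ih =>
    intro w t
    obtain ⟨b, cs⟩ := t
    cases w with
    | nil => simp [addWordGo, isExistGo]
    | cons c' ws =>
      simp only [addWordGo, isExistGo, findChild_updateChild]
      by_cases h : c = c'
      · subst h
        simp only [List.cons_prefix_cons, true_and]
        cases hfc : findChild cs c with
        | some sub => simp [ih]
        | none =>
          simp only [Option.getD_none]
          cases ps with
          | nil => simp [isExistGo]
          | cons u ps' => simp [ih, isExistGo_fresh]
      · simp [h, List.cons_prefix_cons]

theorem isExistGo_build (ws : List String) (p : List Char) : ∀ (t : PTrie),
    isExistGo (ws.foldl (fun t w => addWordGo w.toList t) t) p =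
      (isExistGo t p || ws.any (fun w => decide (p <+: w.toList))) := by
  induction ws with
  | nil => simp
  | cons w ws ih =>
    intro t
    simp only [List.foldl_cons, List.any_cons, ih, isExistGo_addWordGo, Bool.or_assoc]

theorem mem_addPrefs (x : String) : ∀ (cs : List Char) (a : String) (s : PySem.Set String),
    x ∈ (cs.foldl
        (fun (st : String × PySem.Set String) ch =>
          let p := st.1.push ch
          (p, PySem.Set.add st.2 p)) (a, s)).2 ↔
      x ∈ s ∨ ∃ t, t ≠ [] ∧ t <+: cs ∧ x.toList = a.toList ++ t := by
  intro cs
  induction cs with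
  | nil => intro a s; simp
  | cons ch cs ih =>
    intro a s
    simp only [List.foldl_cons, ih, PySem.Set.mem_add, String.toList_push]
    constructor
    · rintro (⟨hs | hx⟩ | ⟨t, ht, hpre, hlist⟩)
      · exact Or.inl hs
      · exact Or.inr ⟨[ch], by simp, by simp, by simp [hx]⟩
      · exact Or.inr ⟨ch :: t, by simp, by simpa using hpre,
          by simpa [List.append_assoc] using hlist⟩
    · rintro (hs | ⟨t, ht, hpre, hlist⟩)
      · exact Or.inl (Or.inl hs)
      · obtain ⟨t', rfl⟩ : ∃ t', t = ch :: t' := by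
          cases t with
          | nil => exact absurd rfl ht
          | cons u t' =>
            obtain ⟨h1, -⟩ := List.cons_prefix_cons.mp hpre
            exact ⟨t', by rw [h1]⟩
        cases t' with
        | nil =>
          refine Or.inl (Or.inr ?_)
          apply String.toList_inj.mp
          simpa [String.toList_push] using hlist
        | cons u t'' =>
          refine Or.inr ⟨u :: t'', by simp, by simpa using hpre, ?_⟩
          simpa [List.append_assoc] using hlist

theorem mem_seen_go (x : String) : ∀ (ws : List String) (s : PySem.Set String),
    x ∈ (ws.foldl
        (fun s w =>
          (w.toList.foldl
            (fun (st : String × PySem.Set String) ch =>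
              let p := st.1.push ch
              (p, PySem.Set.add st.2 p)) ("", s)).2) s) ↔
      x ∈ s ∨ ∃ w ∈ ws, ∃ t, t ≠ [] ∧ t <+: w.toList ∧ x.toList = t := by
  intro ws
  induction ws with
  | nil => intro s; simp
  | cons w ws ih =>
    intro s
    simp only [List.foldl_cons, ih, mem_addPrefs]
    constructor
    · rintro (⟨hs | ⟨t, ht, hp, hl⟩⟩ | ⟨w', hw', ht⟩)
      · exact Or.inl hs
      · exact Or.inr ⟨w, by simp, t, ht, hp, by simpa using hl⟩
      · exact Or.inr ⟨w', by simp [hw'], ht⟩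
    · rintro (hs | ⟨w', hw', t, ht, hp, hl⟩)
      · exact Or.inl (Or.inl hs)
      · rcases List.mem_cons.mp hw' with rfl | hw'
        · exact Or.inl (Or.inr ⟨t, ht, hp, by simpa using hl⟩)
        · exact Or.inr ⟨w', hw', t, ht, hp, hl⟩

theorem mem_seen (x : String) (ws : List String) :
    x ∈ (ws.foldl
        (fun s w =>
          (w.toList.foldl
            (fun (st : String × PySem.Set String) ch =>
              let p := st.1.push ch
              (p, PySem.Set.add st.2 p)) ("", s)).2)
        (PySem.Set.ofList [""])) ↔
      x.toList = [] ∨ ∃ w ∈ ws, x.toList <+: w.toList := by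
  rw [mem_seen_go]
  have hempty : x ∈ PySem.Set.ofList [""] ↔ x.toList = [] := by
    rw [PySem.Set.mem_ofList]
    constructor
    · rintro h; simp at h; simp [h]
    · intro h; simp [String.toList_inj.mp (by simpa using h : x.toList = String.toList "")]
  rw [hempty]
  constructor
  · rintro (h | ⟨w, hw, t, ht, hp, hl⟩)
    · exact Or.inl h
    · exact Or.inr ⟨w, hw, hl ▸ hp⟩
  · rintro (h | ⟨w, hw, hp⟩)
    · exact Or.inl h
    · by_cases hx : x.toList = []
      · exact Or.inl hx
      · exact Or.inr ⟨w, hw, x.toList, hx, hp, rfl⟩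

-- ===== VERDICT (by name: the statement is the Claim_ definition above) =====
theorem solve_spec : Claim_equal_solve := by
  intro words prefixes _
  show solve words prefixes = solve_alt words prefixes
  simp only [solve, solve_alt]
  rw [PySem.List.foldl_count_if, zero_add]
  congr 1
  apply List.countP_congr
  intro q _
  rw [isExistGo_build, isExistGo_fresh, PySem.Set.contains_iff, mem_seen]
  simp
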